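-- pv_equiv track=rewrite | github.com/Davlen14/gameday-plus-predictor | player_props_generator.py | _is_rivalry_game
-- ===== SOURCE A (Python) =====
-- def _is_rivalry_game(home_team: str, away_team: str) -> bool:
--     """Check if this is a known rivalry game"""
--     rivalry_pairs = [
--         ('Ohio State', 'Michigan'),
--         ('Alabama', 'Auburn'),
--         ('Georgia', 'Georgia Tech'),
--         ('Florida', 'Florida State'),
--         ('Texas', 'Oklahoma')
--     ]
--
--     teams = {home_team.lower(), away_team.lower()}
--     for team1, team2 in rivalry_pairs:
--         if {team1.lower(), team2.lower()}.issubset(teams):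
--             return True
--     return False
-- ===== SOURCE B (Python) =====
-- # Prebuilt bidirectional rival map: one dict lookup replaces the loop over pairs with set-subset tests.
-- _RIVAL_OF = {
--     'ohio state': 'michigan', 'michigan': 'ohio state',
--     'alabama': 'auburn', 'auburn': 'alabama',
--     'georgia': 'georgia tech', 'georgia tech': 'georgia',
--     'florida': 'florida state', 'florida state': 'florida',
--     'texas': 'oklahoma', 'oklahoma': 'texas',
-- }
--
--
-- def _is_rivalry_game(home_team: str, away_team: str) -> bool:
--     return _RIVAL_OF.get(home_team.lower()) == away_team.lower()
-- ===== Notes on version B (the rewrite author's own statement) =====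
-- stated objective: idiomatic
-- what changed: Replaces the loop over rivalry pairs with per-iteration set construction and issubset tests by a prebuilt bidirectional rival map consulted with a single dict lookup compared against the lowercased opponent.
import Mathlib
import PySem

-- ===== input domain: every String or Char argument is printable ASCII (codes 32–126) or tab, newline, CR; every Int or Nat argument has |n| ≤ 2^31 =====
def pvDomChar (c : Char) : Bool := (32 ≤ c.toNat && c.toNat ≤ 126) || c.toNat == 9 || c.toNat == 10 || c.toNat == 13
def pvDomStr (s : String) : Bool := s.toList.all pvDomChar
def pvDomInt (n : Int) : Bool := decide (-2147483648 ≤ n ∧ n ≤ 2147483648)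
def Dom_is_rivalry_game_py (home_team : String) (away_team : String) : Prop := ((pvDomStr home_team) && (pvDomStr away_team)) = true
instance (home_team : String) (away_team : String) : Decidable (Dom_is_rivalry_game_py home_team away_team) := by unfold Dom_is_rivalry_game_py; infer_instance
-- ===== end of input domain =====

-- B replaces A's loop over rivalry pairs (building a set and testing issubset per pair) by a
-- prebuilt bidirectional rival map consulted with one lookup; idiomatic, same observable result.


-- ===== PORT A =====
def pvRivalryPairs : List (String × String) :=
  [("Ohio State", "Michigan"), ("Alabama", "Auburn"), ("Georgia", "Georgia Tech"),
   ("Florida", "Florida State"), ("Texas", "Oklahoma")]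

def is_rivalry_game_py (home_team : String) (away_team : String) : Bool :=
  let teams : PySem.Set String :=
    PySem.Set.ofList [PySem.Str.lower home_team, PySem.Str.lower away_team]
  pvRivalryPairs.any (fun p =>
    PySem.Set.issubset (PySem.Set.ofList [PySem.Str.lower p.1, PySem.Str.lower p.2]) teams)

-- ===== PORT B =====
-- Source B's dict literal _RIVAL_OF, built as Python builds it: sequential inserts in source order.
def pvRivalOf : PySem.Dict String String :=
  ((((((((((PySem.Dict.empty.insert "ohio state" "michigan").insert
    "michigan" "ohio state").insert
    "alabama" "auburn").insert
    "auburn" "alabama").insert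
    "georgia" "georgia tech").insert
    "georgia tech" "georgia").insert
    "florida" "florida state").insert
    "florida state" "florida").insert
    "texas" "oklahoma").insert
    "oklahoma" "texas")

def is_rivalry_game_py_alt (home_team : String) (away_team : String) : Bool :=
  pvRivalOf.get? (PySem.Str.lower home_team) == some (PySem.Str.lower away_team)

-- ===== PRECONDITION & SPEC =====
def Spec_is_rivalry_game_py (home_team : String) (away_team : String) (out : Bool) : Prop := out = is_rivalry_game_py_alt home_team away_team
instance (home_team : String) (away_team : String) (out : Bool) : Decidable (Spec_is_rivalry_game_py home_team away_team out) := by unfold Spec_is_rivalry_game_py; infer_instance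

-- ===== CLAIM (what is proved, stated in full; the proofs are below) =====
def Claim_equal_is_rivalry_game_py : Prop := ∀ (home_team : String) (away_team : String), Dom_is_rivalry_game_py home_team away_team → Spec_is_rivalry_game_py home_team away_team (is_rivalry_game_py home_team away_team)

-- ===== LEMMAS AND PROOFS =====

-- A two-element set with distinct elements is a subset of {h, a} iff the elements are h,a in one of the two orders.
lemma pvSub2 (x y h a : String) (hxy : x ≠ y) :
    PySem.Set.issubset (PySem.Set.ofList [x, y]) (PySem.Set.ofList [h, a])
      = ((h == x && a == y) || (a == x && h == y)) := by
  rw [Bool.eq_iff_iff]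
  simp [PySem.Set.issubset_iff, PySem.Set.mem_ofList]
  constructor
  · rintro ⟨hx | hx, hy | hy⟩ <;> simp_all
  · rintro (⟨h1, h2⟩ | ⟨h1, h2⟩) <;> simp_all

-- The heart of the equivalence, stated on the already-lowercased team names.
lemma pvCore (hl al : String) :
    pvRivalryPairs.any (fun p =>
      PySem.Set.issubset (PySem.Set.ofList [PySem.Str.lower p.1, PySem.Str.lower p.2])
        (PySem.Set.ofList [hl, al]))
      = (pvRivalOf.get? hl == some al) := by
  unfold pvRivalryPairs
  simp only [List.any_cons, List.any_nil]
  have l1 : PySem.Str.lower "Ohio State" = "ohio state" := by decide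
  have l2 : PySem.Str.lower "Michigan" = "michigan" := by decide
  have l3 : PySem.Str.lower "Alabama" = "alabama" := by decide
  have l4 : PySem.Str.lower "Auburn" = "auburn" := by decide
  have l5 : PySem.Str.lower "Georgia" = "georgia" := by decide
  have l6 : PySem.Str.lower "Georgia Tech" = "georgia tech" := by decide
  have l7 : PySem.Str.lower "Florida" = "florida" := by decide
  have l8 : PySem.Str.lower "Florida State" = "florida state" := by decide
  have l9 : PySem.Str.lower "Texas" = "texas" := by decide
  have l10 : PySem.Str.lower "Oklahoma" = "oklahoma" := by decide
  simp only [l1, l2, l3, l4, l5, l6, l7, l8, l9, l10]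
  rw [pvSub2 _ _ _ _ (by decide), pvSub2 _ _ _ _ (by decide), pvSub2 _ _ _ _ (by decide),
      pvSub2 _ _ _ _ (by decide), pvSub2 _ _ _ _ (by decide)]
  unfold pvRivalOf
  simp only [PySem.Dict.get?_insert, PySem.Dict.get?_empty]
  by_cases h1 : hl = "ohio state"
  · subst h1; simp [eq_comm]
  by_cases h2 : hl = "michigan"
  · subst h2; simp [eq_comm]
  by_cases h3 : hl = "alabama"
  · subst h3; simp [eq_comm]
  by_cases h4 : hl = "auburn"
  · subst h4; simp [eq_comm]
  by_cases h5 : hl = "georgia"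
  · subst h5; simp [eq_comm]
  by_cases h6 : hl = "georgia tech"
  · subst h6; simp [eq_comm]
  by_cases h7 : hl = "florida"
  · subst h7; simp [eq_comm]
  by_cases h8 : hl = "florida state"
  · subst h8; simp [eq_comm]
  by_cases h9 : hl = "texas"
  · subst h9; simp [eq_comm]
  by_cases h10 : hl = "oklahoma"
  · subst h10; simp [eq_comm]
  simp [beq_iff_eq, h1, h2, h3, h4, h5, h6, h7, h8, h9, h10]

-- ===== VERDICT (by name: the statement is the Claim_ definition above) =====
theorem is_rivalry_game_py_spec : Claim_equal_is_rivalry_game_py := by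
  intro home_team away_team _
  unfold Spec_is_rivalry_game_py is_rivalry_game_py is_rivalry_game_py_alt
  exact pvCore (PySem.Str.lower home_team) (PySem.Str.lower away_team)
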